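-- pv_equiv track=rewrite | github.com/Saravana-Ace/Wayfair_Coding_Challenge | sorting_slices.py | solution
-- ===== SOURCE A (Python) =====
-- def solution(A):
--     i = 0
--     big = A[i]
--     slices = 0
--     big_list = []
--
--     while(i < len(A) - 1):
--         if(big < A[i+1]):
--             big = A[i+1]
--             big_list.append(big)
--         i += 1
--
--     if(big == A[len(A) - 1]):
--         big_list.append(big)
--
--     return len(big_list)
--
--     pass
-- ===== SOURCE B (Python) =====
-- def solution(A):
--     n = len(A)
--     count = sum(1 for j in range(1, n) if A[j] > max(A[:j]))
--     return count + (1 if max(A) == A[-1] else 0)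
-- ===== Notes on version B (the rewrite author's own statement) =====
-- stated objective: alternative
-- what changed: Replaces A's single-pass running-max mutation with an accumulated big_list by a declarative two-part formula: a filtered sum counting the indices whose element exceeds the maximum of the preceding prefix, plus a check that the global maximum equals the last element; no running state is kept (B is quadratic, A linear).
import Mathlib
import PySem

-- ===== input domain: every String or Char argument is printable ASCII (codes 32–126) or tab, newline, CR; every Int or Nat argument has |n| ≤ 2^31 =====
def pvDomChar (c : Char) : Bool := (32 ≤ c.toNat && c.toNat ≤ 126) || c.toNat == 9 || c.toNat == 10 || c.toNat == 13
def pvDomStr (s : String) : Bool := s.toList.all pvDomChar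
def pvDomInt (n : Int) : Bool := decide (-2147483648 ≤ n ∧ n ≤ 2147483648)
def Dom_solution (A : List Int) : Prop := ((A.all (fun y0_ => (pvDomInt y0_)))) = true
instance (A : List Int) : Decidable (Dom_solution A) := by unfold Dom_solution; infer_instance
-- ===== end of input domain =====

-- B replaces A's running-max loop with state by a declarative filtered sum over prefix maxima plus a global max check (objective: alternative).

-- ===== PORT A =====
-- while loop over i = 0 .. len(A)-2, state (big, big_list)
def solution (A : List Int) : Int :=
  let st := (PySem.List.pyRange 0 ((A.length : Int) - 1) 1).foldl
    (fun (s : Int × List Int) i =>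
      if s.1 < PySem.List.pyGetD A (i + 1) 0 then
        (PySem.List.pyGetD A (i + 1) 0, s.2 ++ [PySem.List.pyGetD A (i + 1) 0])
      else s)
    (PySem.List.pyGetD A 0 0, [])
  let bl := if st.1 = PySem.List.pyGetD A ((A.length : Int) - 1) 0 then st.2 ++ [st.1] else st.2
  (bl.length : Int)

-- ===== PORT B =====
def solution_alt (A : List Int) : Int :=
  let count := ((PySem.List.pyRange 1 (A.length : Int) 1).map
    (fun j => if PySem.List.pyGetD A j 0 >
        (PySem.List.max? (PySem.List.slice A none (some j)) (fun y => y)).getD 0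
      then (1 : Int) else 0)).sum
  count + (if (PySem.List.max? A (fun y => y)).getD 0 = PySem.List.pyGetD A (-1) 0 then 1 else 0)

-- ===== PRECONDITION & SPEC =====
-- Pre_ excludes only the empty list, on which A raises IndexError reading the first element.
def Pre_solution (A : List Int) : Prop := A ≠ []
instance (A : List Int) : Decidable (Pre_solution A) := by unfold Pre_solution; infer_instance
def pvWitness_solution : List Int := [1, 3, 2]

def Spec_solution (A : List Int) (out : Int) : Prop := out = solution_alt A
instance (A : List Int) (out : Int) : Decidable (Spec_solution A out) := by unfold Spec_solution; infer_instance

-- ===== CLAIM (what is proved, stated in full; the proofs are below) =====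
def Claim_equal_solution : Prop := ∀ (A : List Int), Dom_solution A → Pre_solution A → Spec_solution A (solution A)

-- ===== LEMMAS AND PROOFS =====

-- common abstract count: number of strict increases of the running maximum
def countB (a : Int) : List Int → Int
  | [] => 0
  | x :: xs => (if a < x then 1 else 0) + countB (max a x) xs

-- A-side: the index fold over pyRange reads the successive elements
theorem afold {σ : Type} (g : σ → Int → σ) (l : List Int) :
    ∀ (j : Nat) (s : σ),
      (PySem.List.pyRange (j : Int) ((l.length : Int)) 1).foldl
        (fun s i => g s (PySem.List.pyGetD l i 0)) s
      = (l.drop j).foldl g s := by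
  intro j
  induction hn : l.length - j generalizing j with
  | zero =>
    intro s
    have hj : l.length ≤ j := by omega
    rw [List.drop_eq_nil_of_le hj]
    have : PySem.List.pyRange (j : Int) ((l.length : Int)) 1 = [] := by
      simp [PySem.List.pyRange]
      omega
    rw [this]
    rfl
  | succ n ih =>
    intro s
    have hj : j < l.length := by omega
    rw [PySem.List.pyRange_one_cons (by exact_mod_cast hj)]
    have hd : l.drop j = l[j] :: l.drop (j + 1) := by
      rw [List.drop_eq_getElem_cons hj]
    rw [hd]
    simp only [List.foldl_cons]
    have hget : PySem.List.pyGetD l (j : Int) 0 = l[j] := by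
      rw [PySem.List.pyGetD_natCast]
      simp [List.getD_eq_getElem?_getD, hj]
    rw [hget]
    have : ((j : Int) + 1) = ((j + 1 : Nat) : Int) := by push_cast; ring
    rw [this, ih (j + 1) (by omega)]

-- A-side loop state characterisation
theorem aloop (l : List Int) : ∀ (a : Int) (acc : List Int),
    (l.foldl (fun (s : Int × List Int) x =>
        if s.1 < x then (x, s.2 ++ [x]) else s) (a, acc))
    = (l.foldl max a,
       (l.foldl (fun (s : Int × List Int) x =>
        if s.1 < x then (x, s.2 ++ [x]) else s) (a, acc)).2) ∧
    (((l.foldl (fun (s : Int × List Int) x =>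
        if s.1 < x then (x, s.2 ++ [x]) else s) (a, acc)).2.length : Int)
      = (acc.length : Int) + countB a l) := by
  induction l with
  | nil => intro a acc; simp [countB]
  | cons x xs ih =>
    intro a acc
    by_cases h : a < x
    · have hm : max a x = x := max_eq_right (le_of_lt h)
      simp only [List.foldl_cons, if_pos h, countB, hm]
      rcases ih x (acc ++ [x]) with ⟨h1, h2⟩
      refine ⟨h1, ?_⟩
      rw [h2]
      simp only [List.length_append, List.length_cons, List.length_nil]
      push_cast
      ring
    · have hm : max a x = a := max_eq_left (le_of_not_gt h)
      simp only [List.foldl_cons, if_neg h, countB, hm]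
      rcases ih a acc with ⟨h1, h2⟩
      refine ⟨h1, ?_⟩
      rw [h2]
      ring

-- B-side: the filtered sum counts the running-max strict increases
theorem bsum (l : List Int) : ∀ (p : Int) (ps : List Int),
    ((PySem.List.pyRange (((p :: ps).length : Int)) (((p :: ps).length : Int) + (l.length : Int)) 1).map
      (fun j => if PySem.List.pyGetD (p :: ps ++ l) j 0 >
          (PySem.List.max? (PySem.List.slice (p :: ps ++ l) none (some j)) (fun y => y)).getD 0
        then (1 : Int) else 0)).sum
    = countB (ps.foldl max p) l := by
  induction l with
  | nil =>
    intro p ps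
    have : PySem.List.pyRange (((p :: ps).length : Int)) (((p :: ps).length : Int) + 0) 1 = [] := by
      simp [PySem.List.pyRange]
    simp only [List.length_nil, Nat.cast_zero, this]
    simp [countB]
  | cons x xs ih =>
    intro p ps
    set A := p :: ps ++ (x :: xs) with hA
    have hlen : ((p :: ps).length : Int) < ((p :: ps).length : Int) + ((x :: xs).length : Int) := by
      simp
    rw [PySem.List.pyRange_one_cons hlen]
    simp only [List.map_cons, List.sum_cons]
    -- head term: j = (p::ps).length
    have hslice : PySem.List.slice A none (some ((p :: ps).length : Int)) = p :: ps := by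
      rw [PySem.List.slice_to_natCast]
      rw [hA]
      rw [show p :: ps ++ (x :: xs) = (p :: ps) ++ (x :: xs) by simp]
      exact List.take_left' rfl
    have hmax : (PySem.List.max? (PySem.List.slice A none (some ((p :: ps).length : Int)))
        (fun y => y)).getD 0 = ps.foldl max p := by
      rw [hslice, PySem.List.max?_id_cons]; rfl
    have hget : PySem.List.pyGetD A ((p :: ps).length : Int) 0 = x := by
      rw [PySem.List.pyGetD_natCast, hA]
      rw [show p :: ps ++ (x :: xs) = (p :: ps) ++ (x :: xs) by simp]
      rw [List.getD_eq_getElem?_getD, List.getElem?_append_right (le_refl _)]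
      simp
    rw [hmax, hget]
    -- tail: shift the prefix by one
    have hA' : A = (p :: (ps ++ [x])) ++ xs := by simp [hA]
    have hlen' : ((p :: (ps ++ [x])).length : Int) = ((p :: ps).length : Int) + 1 := by
      simp
    have hlen2 : ((p :: ps).length : Int) + ((x :: xs).length : Int)
        = ((p :: (ps ++ [x])).length : Int) + (xs.length : Int) := by
      simp
      ring
    rw [hlen2]
    have htail := ih p (ps ++ [x])
    rw [show (p :: (ps ++ [x]) ++ xs) = A by rw [hA']] at htail
    rw [← hlen']
    rw [htail]
    have hfold : (ps ++ [x]).foldl max p = max (ps.foldl max p) x := by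
      rw [List.foldl_append]; rfl
    rw [hfold, countB]

-- final element of a nonempty list, both access styles
theorem last_getD (a : Int) (l : List Int) :
    PySem.List.pyGetD (a :: l) ((l.length : Nat) : Int) 0
      = PySem.List.pyGetD (a :: l) (-1) 0 := by
  rw [PySem.List.pyGetD_neg_one (a :: l) 0 (by simp), PySem.List.pyGetD_natCast,
    List.getLast_eq_getElem]
  simp [List.getD_eq_getElem?_getD]
  rfl

-- shift the A-side index fold onto the tail
theorem afold_shift {σ : Type} (g : σ → Int → σ) (a : Int) (l : List Int) (s : σ) :
    (PySem.List.pyRange 0 (((a :: l).length : Int) - 1) 1).foldl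
      (fun s i => g s (PySem.List.pyGetD (a :: l) (i + 1) 0)) s
    = l.foldl g s := by
  have hb : (((a :: l).length : Int) - 1) = ((l.length : Nat) : Int) := by simp
  rw [hb]
  have h2 := afold g l 0 s
  simp only [Nat.cast_zero, List.drop_zero] at h2
  rw [← h2]
  apply PySem.List.foldl_congr_mem
  intro s' i hi
  have hmem := (PySem.List.mem_pyRange_one).mp hi
  have h0i : 0 ≤ i := hmem.1
  have : PySem.List.pyGetD (a :: l) (i + 1) 0 = PySem.List.pyGetD l i 0 := by
    have hi' : i = ((i.toNat : Nat) : Int) := by omega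
    rw [hi']
    have hc : ((i.toNat : Nat) : Int) + 1 = (((i.toNat + 1 : Nat)) : Int) := by push_cast; ring
    rw [hc, PySem.List.pyGetD_natCast, PySem.List.pyGetD_natCast]
    simp
  rw [this]

theorem main_eq (a : Int) (l : List Int) : solution (a :: l) = solution_alt (a :: l) := by
  unfold solution solution_alt
  simp only []
  rw [PySem.List.pyGetD_zero_cons a l 0]
  rw [afold_shift (fun (s : Int × List Int) x =>
      if s.1 < x then (x, s.2 ++ [x]) else s) a l (a, [])]
  rcases aloop l a [] with ⟨h1, h2⟩
  have hfst : (l.foldl (fun (s : Int × List Int) x =>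
      if s.1 < x then (x, s.2 ++ [x]) else s) (a, [])).1 = l.foldl max a := by
    rw [h1]
  have hlen3 : (((a :: l).length : Int)) = 1 + (l.length : Int) := by
    simp [List.length_cons]
    omega
  rw [hlen3]
  have hb' : ((PySem.List.pyRange 1 (1 + (l.length : Int)) 1).map
      (fun j => if PySem.List.pyGetD (a :: l) j 0 >
          (PySem.List.max? (PySem.List.slice (a :: l) none (some j)) (fun y => y)).getD 0
        then (1 : Int) else 0)).sum = countB a l := by
    have h := bsum l a []
    simp only [List.length_cons, List.length_nil, Nat.cast_one, zero_add, List.foldl_nil,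
      List.cons_append, List.nil_append] at h
    exact h
  rw [hfst, hb', PySem.List.max?_id_cons]
  simp only [Option.getD_some]
  have hidx : (1 + (l.length : Int) - 1) = ((l.length : Nat) : Int) := by ring
  rw [hidx, last_getD a l]
  norm_num at h2
  by_cases hc : l.foldl max a = PySem.List.pyGetD (a :: l) (-1) 0
  · rw [if_pos hc, if_pos hc]
    simp only [List.length_append, List.length_cons, List.length_nil]
    push_cast
    rw [h2]
  · rw [if_neg hc, if_neg hc, h2]
    ring

-- ===== VERDICT (by name: the statement is the Claim_ definition above) =====
theorem solution_spec : Claim_equal_solution := by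
  intro A _ hpre
  unfold Spec_solution
  match A with
  | [] => exact absurd rfl hpre
  | a :: l => exact main_eq a l
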